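-- pv_equiv track=rewrite | github.com/Guayixxx/Sistemas-L---Evolutivos | Fitness.py | penalty_for_bracket_sequences
-- ===== SOURCE A (Python) =====
-- def penalty_for_bracket_sequences(rule):
--     """
--     Penaliza secuencias largas de corchetes consecutivos, incluyendo
--     tanto '[' como ']'.
--     """
--     max_sequence_open = 0
--     max_sequence_close = 0
--     current_sequence_open = 0
--     current_sequence_close = 0
--
--     for char in rule:
--         if char == '[':
--             current_sequence_open += 1
--             current_sequence_close = 0
--             max_sequence_open = max(max_sequence_open, current_sequence_open)
--         elif char == ']':
--             current_sequence_close += 1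
--             current_sequence_open = 0
--             max_sequence_close = max(max_sequence_close, current_sequence_close)
--         else:
--             current_sequence_open = 0
--             current_sequence_close = 0
--
--     # Penalización proporcional a la longitud máxima de secuencias de '[' o ']'
--     return (max_sequence_open + max_sequence_close) * 2
-- ===== SOURCE B (Python) =====
-- def penalty_for_bracket_sequences(rule):
--     """
--     Penaliza secuencias largas de corchetes consecutivos, incluyendo
--     tanto '[' como ']'.
--     """
--     # Run-length encode the string, then take each maximum in its own pass.
--     runs = []
--     for c in rule:
--         if runs and runs[-1][0] == c:
--             runs[-1][1] += 1
--         else: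
--             runs.append([c, 1])
--     open_max = max((n for k, n in runs if k == '['), default=0)
--     close_max = max((n for k, n in runs if k == ']'), default=0)
--     return (open_max + close_max) * 2
-- ===== Notes on version B (the rewrite author's own statement) =====
-- stated objective: alternative
-- what changed: Replaces the interleaved four-counter character loop by a run-length encoding of the string followed by two independent max passes over the runs.
import Mathlib
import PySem

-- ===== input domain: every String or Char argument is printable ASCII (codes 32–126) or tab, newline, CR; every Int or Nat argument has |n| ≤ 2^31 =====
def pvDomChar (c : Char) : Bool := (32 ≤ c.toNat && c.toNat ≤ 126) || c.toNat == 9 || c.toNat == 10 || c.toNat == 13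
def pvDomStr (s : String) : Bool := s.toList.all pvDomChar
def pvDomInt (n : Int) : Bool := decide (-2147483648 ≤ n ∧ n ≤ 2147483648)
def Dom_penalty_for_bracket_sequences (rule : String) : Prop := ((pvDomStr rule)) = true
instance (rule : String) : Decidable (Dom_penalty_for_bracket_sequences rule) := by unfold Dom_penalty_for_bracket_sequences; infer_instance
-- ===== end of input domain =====

-- B replaces A's interleaved four-counter scan by a run-length encoding plus two
-- independent max passes; same cost, different decomposition ("alternative").

-- ===== PORT A =====
-- state: (max_sequence_open, max_sequence_close, current_sequence_open, current_sequence_close)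
def pvStepA (st : Int × Int × Int × Int) (c : Char) : Int × Int × Int × Int :=
  let (mo, mc, co, cc) := st
  if c = '[' then (max mo (co + 1), mc, co + 1, 0)
  else if c = ']' then (mo, max mc (cc + 1), 0, cc + 1)
  else (mo, mc, 0, 0)

def penalty_for_bracket_sequences (rule : String) : Int :=
  let s := rule.toList.foldl pvStepA (0, 0, 0, 0)
  (s.1 + s.2.1) * 2

-- ===== PORT B =====
-- run-length encoding, built front run first (accumulated reversed, then reversed)
def pvStepRun (acc : List (Char × Int)) (c : Char) : List (Char × Int) :=
  match acc with
  | (k, n) :: t => if k = c then (k, n + 1) :: t else (c, 1) :: (k, n) :: t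
  | [] => [(c, 1)]

def pvRuns (rule : String) : List (Char × Int) :=
  (rule.toList.foldl pvStepRun []).reverse

-- max(（n for k,n in runs if k == key), default=0)
def pvMaxFor (key : Char) (runs : List (Char × Int)) : Int :=
  runs.foldl (fun a p => if p.1 = key then max a p.2 else a) 0

def penalty_for_bracket_sequences_alt (rule : String) : Int :=
  let rs := pvRuns rule
  (pvMaxFor '[' rs + pvMaxFor ']' rs) * 2

-- ===== PRECONDITION & SPEC =====
def Spec_penalty_for_bracket_sequences (rule : String) (out : Int) : Prop := out = penalty_for_bracket_sequences_alt rule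
instance (rule : String) (out : Int) : Decidable (Spec_penalty_for_bracket_sequences rule out) := by unfold Spec_penalty_for_bracket_sequences; infer_instance

-- ===== CLAIM (what is proved, stated in full; the proofs are below) =====
def Claim_equal_penalty_for_bracket_sequences : Prop := ∀ (rule : String), Dom_penalty_for_bracket_sequences rule → Spec_penalty_for_bracket_sequences rule (penalty_for_bracket_sequences rule)

-- ===== LEMMAS AND PROOFS =====

-- longest run of `k` recorded in a run list
def pvMaxKey (k : Char) : List (Char × Int) → Int
  | [] => 0
  | (k', n) :: t => if k' = k then max n (pvMaxKey k t) else pvMaxKey k t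

-- length of the leading run if it is a `k` run, else 0
def pvTrail (k : Char) : List (Char × Int) → Int
  | [] => 0
  | (k', n) :: _ => if k' = k then n else 0

-- A's state reconstructed from the (reversed) run accumulator
def pvS (r : List (Char × Int)) : Int × Int × Int × Int :=
  (pvMaxKey '[' r, pvMaxKey ']' r, pvTrail '[' r, pvTrail ']' r)

theorem pvMaxKey_nonneg (k : Char) (l : List (Char × Int)) : 0 ≤ pvMaxKey k l := by
  induction l with
  | nil => simp [pvMaxKey]
  | cons x t ih =>
    obtain ⟨k', n⟩ := x
    simp only [pvMaxKey]
    split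
    · exact le_trans ih (le_max_right _ _)
    · exact ih

theorem pvStep_commute (r : List (Char × Int)) (c : Char) :
    pvStepA (pvS r) c = pvS (pvStepRun r c) := by
  cases r with
  | nil =>
    by_cases h1 : c = '[' <;> by_cases h2 : c = ']' <;>
      simp_all [pvStepA, pvStepRun, pvS, pvMaxKey, pvTrail]
  | cons x t =>
    obtain ⟨k, n⟩ := x
    by_cases hk : k = c
    · subst hk
      by_cases h1 : k = '[' <;> by_cases h2 : k = ']' <;>
        simp_all [pvStepA, pvStepRun, pvS, pvMaxKey, pvTrail] <;>
        (simp only [max_def]; split_ifs <;> omega)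
    · by_cases h1 : c = '[' <;> by_cases h2 : c = ']' <;>
        simp_all [pvStepA, pvStepRun, pvS, pvMaxKey, pvTrail] <;>
        (simp only [max_def]; split_ifs <;> omega)

theorem pvFold_commute (l : List Char) (r : List (Char × Int)) :
    l.foldl pvStepA (pvS r) = pvS (l.foldl pvStepRun r) := by
  induction l generalizing r with
  | nil => rfl
  | cons c t ih => simp only [List.foldl_cons, pvStep_commute, ih]

theorem pvMaxFor_eq_maxKey_aux (k : Char) (l : List (Char × Int)) (a : Int) (ha : 0 ≤ a) :
    l.foldl (fun a p => if p.1 = k then max a p.2 else a) a = max a (pvMaxKey k l) := by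
  induction l generalizing a with
  | nil => simp [pvMaxKey, max_eq_left ha]
  | cons x t ih =>
    obtain ⟨k', n⟩ := x
    simp only [List.foldl_cons, pvMaxKey]
    by_cases h : k' = k
    · rw [if_pos (show (k', n).1 = k from h), if_pos h,
        ih (max a n) (le_trans ha (le_max_left _ _)), max_assoc]
    · rw [if_neg (show ¬ (k', n).1 = k from h), if_neg h]
      exact ih a ha

theorem pvMaxFor_eq_maxKey (k : Char) (l : List (Char × Int)) :
    pvMaxFor k l = pvMaxKey k l := by
  rw [pvMaxFor, pvMaxFor_eq_maxKey_aux k l 0 le_rfl, max_eq_right (pvMaxKey_nonneg k l)]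

theorem pvMaxKey_append (k : Char) (l₁ l₂ : List (Char × Int)) :
    pvMaxKey k (l₁ ++ l₂) = max (pvMaxKey k l₁) (pvMaxKey k l₂) := by
  induction l₁ with
  | nil => simp [pvMaxKey, max_eq_right (pvMaxKey_nonneg k l₂)]
  | cons x t ih =>
    obtain ⟨k', n⟩ := x
    by_cases h : k' = k <;> simp [pvMaxKey, h, ih, max_assoc]

theorem pvMaxKey_reverse (k : Char) (l : List (Char × Int)) :
    pvMaxKey k l.reverse = pvMaxKey k l := by
  induction l with
  | nil => rfl
  | cons x t ih =>
    obtain ⟨k', n⟩ := x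
    rw [List.reverse_cons, pvMaxKey_append, ih]
    by_cases h : k' = k
    · have hnn := pvMaxKey_nonneg k t
      simp only [pvMaxKey, if_pos h]
      simp only [max_def]
      split_ifs <;> omega
    · simp [pvMaxKey, h, max_eq_left (pvMaxKey_nonneg k t)]

-- ===== VERDICT (by name: the statement is the Claim_ definition above) =====
theorem penalty_for_bracket_sequences_spec : Claim_equal_penalty_for_bracket_sequences := by
  intro rule _
  have key : ∀ (R : List (Char × Int)),
      ((pvS R).1 + (pvS R).2.1) * 2 = (pvMaxFor '[' R.reverse + pvMaxFor ']' R.reverse) * 2 := by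
    intro R
    rw [pvMaxFor_eq_maxKey, pvMaxFor_eq_maxKey, pvMaxKey_reverse, pvMaxKey_reverse]
    rfl
  show penalty_for_bracket_sequences rule = penalty_for_bracket_sequences_alt rule
  have h0 : ((0, 0, 0, 0) : Int × Int × Int × Int) = pvS [] := rfl
  rw [penalty_for_bracket_sequences, penalty_for_bracket_sequences_alt, pvRuns, h0,
    pvFold_commute]
  exact key _
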